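-- pv_equiv track=rewrite | github.com/Stereo101/Advent-of-Code-2021 | day8/day8.py | rec_perm_gen
-- ===== SOURCE A (Python) =====
-- def rec_perm_gen(s,mapping,used=set()):
--     if s == "":
--         yield ""
--         return
--     x = s[0]
--     for c in mapping[x]:
--         if c in used:
--             continue
--         for tail in rec_perm_gen(s[1:],mapping,used=used | set(c)):
--             yield c + tail
-- ===== SOURCE B (Python) =====
-- def rec_perm_gen(s, mapping, used=set()):
--     # Explicit-stack DFS: each frame holds (prefix, used, remaining suffix, pending chars).
--     if s == "":
--         yield ""
--         return
--     stack = [("", used, s[1:], list(mapping[s[0]]))]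
--     while stack:
--         prefix, u, rest, pending = stack[-1]
--         if not pending:
--             stack.pop()
--             continue
--         c = pending.pop(0)
--         if c in u:
--             continue
--         if rest == "":
--             yield prefix + c
--         else:
--             stack.append((prefix + c, u | set(c), rest[1:], list(mapping[rest[0]])))
-- ===== Notes on version B (the rewrite author's own statement) =====
-- stated objective: alternative
-- what changed: Replaces A's recursive generator with an iterative explicit-stack DFS loop whose frames hold (prefix, used set, remaining suffix, pending mapping chars), popping/pushing frames instead of recursing, with the same lazy mapping access and yield order.
-- outside the precondition, e.g. on rec_perm_gen('ab', {'a': ''}, set()): A returns [], B returns []; on rec_perm_gen('ab', {'a': 'x'}, {'x'}): A returns [], B returns []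
import Mathlib
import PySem

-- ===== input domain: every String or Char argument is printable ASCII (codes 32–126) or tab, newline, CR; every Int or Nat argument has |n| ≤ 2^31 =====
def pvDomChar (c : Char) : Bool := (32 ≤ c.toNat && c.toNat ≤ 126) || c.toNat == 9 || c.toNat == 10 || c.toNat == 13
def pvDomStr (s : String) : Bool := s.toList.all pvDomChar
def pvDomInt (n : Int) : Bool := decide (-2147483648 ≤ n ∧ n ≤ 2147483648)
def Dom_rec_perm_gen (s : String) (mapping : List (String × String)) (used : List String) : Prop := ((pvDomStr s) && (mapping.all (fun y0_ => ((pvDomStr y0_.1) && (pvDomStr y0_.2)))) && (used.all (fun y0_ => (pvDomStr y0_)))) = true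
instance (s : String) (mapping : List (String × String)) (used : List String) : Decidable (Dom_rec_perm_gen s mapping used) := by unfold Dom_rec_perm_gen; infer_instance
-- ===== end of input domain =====

-- B replaces A's recursive DFS generator with an explicit-stack iterative DFS loop
-- (objective: alternative decomposition, same cost).


-- ===== PORT A =====
-- mapping[x] (dict lookup, first match on the association list); total via getD "",
-- inputs where Python would raise KeyError are excluded by Pre_.
def pvMapValA (mapping : List (String × String)) (x : Char) : List Char :=
  ((List.lookup (String.ofList [x]) mapping).getD "").toList

-- the recursive generator of A, over the char list of s; yields lists of chars
def recPermGo (mapping : List (String × String)) : List Char → List String → List (List Char)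
  | [], _ => [[]]
  | x :: rest, used =>
    (pvMapValA mapping x).flatMap (fun c =>
      if PySem.Set.contains used (String.ofList [c]) then []
      else (recPermGo mapping rest (PySem.Set.union used [String.ofList [c]])).map (fun t => c :: t))

def rec_perm_gen (s : String) (mapping : List (String × String)) (used : List String) : List String :=
  (recPermGo mapping s.toList used).map String.ofList

-- ===== PORT B =====
-- a stack frame of B's loop: (pfx, used, remaining suffix, pending chars)
-- fuel for the while loop (a totality guard only): an exact step count for one frame,
-- computed from the suffix and the pending characters
def dfsCost (mapping : List (String × String)) : List Char → List Char → Nat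
  | _, [] => 1
  | rest, _ :: p =>
    1 + (match rest with
         | [] => 0
         | y :: rest' => dfsCost mapping rest' (((List.lookup (String.ofList [y]) mapping).getD "").toList))
      + dfsCost mapping rest p
termination_by rest pending => (rest.length, pending.length)

-- the while loop: examine the top frame, pop / skip / yield / push as B does
def runDFS (mapping : List (String × String)) :
    Nat → List (List Char × List String × List Char × List Char) → List (List Char)
  | 0, _ => []
  | _ + 1, [] => []
  | f + 1, (pfx, u, rest, pending) :: tail =>
    match pending with
    | [] => runDFS mapping f tail
    | c :: p =>
      if PySem.Set.contains u (String.ofList [c]) then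
        runDFS mapping f ((pfx, u, rest, p) :: tail)
      else
        match rest with
        | [] => (pfx ++ [c]) :: runDFS mapping f ((pfx, u, rest, p) :: tail)
        | y :: rest' =>
          runDFS mapping f
            ((pfx ++ [c], PySem.Set.union u [String.ofList [c]], rest',
              ((List.lookup (String.ofList [y]) mapping).getD "").toList)
             :: (pfx, u, rest, p) :: tail)

def rec_perm_gen_alt (s : String) (mapping : List (String × String)) (used : List String) : List String :=
  match s.toList with
  | [] => [""]
  | x :: rest =>
    let pend := ((List.lookup (String.ofList [x]) mapping).getD "").toList
    (runDFS mapping (dfsCost mapping rest pend) [([], used, rest, pend)]).map String.ofList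

-- ===== PRECONDITION & SPEC =====
-- Pre_ excludes inputs on which the Python raises KeyError when consumed; it requires every
-- character of s to be a key of mapping, which is slightly stronger than the exact run-time
-- condition (a missing key whose position is never reached because every path was pruned does
-- not raise, but that condition is not closed-form); on such excluded inputs A and B agree anyway.
def Pre_rec_perm_gen (s : String) (mapping : List (String × String)) (used : List String) : Prop :=
  (s.toList.all (fun c => (List.lookup (String.ofList [c]) mapping).isSome)) = true
instance (s : String) (mapping : List (String × String)) (used : List String) : Decidable (Pre_rec_perm_gen s mapping used) := by unfold Pre_rec_perm_gen; infer_instance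
def pvWitness_rec_perm_gen : String × (List (String × String)) × List String :=
  ("ab", [("a", "xy"), ("b", "xz")], ["z"])

def Spec_rec_perm_gen (s : String) (mapping : List (String × String)) (used : List String) (out : List String) : Prop := out = rec_perm_gen_alt s mapping used
instance (s : String) (mapping : List (String × String)) (used : List String) (out : List String) : Decidable (Spec_rec_perm_gen s mapping used out) := by unfold Spec_rec_perm_gen; infer_instance

-- ===== CLAIM (what is proved, stated in full; the proofs are below) =====
def Claim_equal_rec_perm_gen : Prop := ∀ (s : String) (mapping : List (String × String)) (used : List String), Dom_rec_perm_gen s mapping used → Pre_rec_perm_gen s mapping used → Spec_rec_perm_gen s mapping used (rec_perm_gen s mapping used)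

-- ===== LEMMAS AND PROOFS =====

-- what A's recursion still owes a frame: for each pending char, either nothing (skipped)
-- or the recursion's results from the frame's suffix, prefixed
def frameContrib (mapping : List (String × String))
    (pfx : List Char) (u : List String) (rest pending : List Char) : List (List Char) :=
  pending.flatMap (fun c =>
    if PySem.Set.contains u (String.ofList [c]) then []
    else (recPermGo mapping rest (PySem.Set.union u [String.ofList [c]])).map (fun t => pfx ++ c :: t))

def stackContrib (mapping : List (String × String))
    (st : List (List Char × List String × List Char × List Char)) : List (List Char) :=
  st.flatMap (fun fr => frameContrib mapping fr.1 fr.2.1 fr.2.2.1 fr.2.2.2)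

def stackCost (mapping : List (String × String))
    (st : List (List Char × List String × List Char × List Char)) : Nat :=
  (st.map (fun fr => dfsCost mapping fr.2.2.1 fr.2.2.2)).sum

theorem dfsCost_nil (mapping : List (String × String)) (rest : List Char) :
    dfsCost mapping rest [] = 1 := by
  cases rest <;> simp [dfsCost]

theorem dfsCost_cons_nil (mapping : List (String × String)) (c : Char) (p : List Char) :
    dfsCost mapping [] (c :: p) = 1 + dfsCost mapping [] p := by
  simp [dfsCost]

theorem dfsCost_cons_cons (mapping : List (String × String)) (y : Char) (rest' : List Char)
    (c : Char) (p : List Char) :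
    dfsCost mapping (y :: rest') (c :: p)
      = 1 + dfsCost mapping rest' (((List.lookup (String.ofList [y]) mapping).getD "").toList)
        + dfsCost mapping (y :: rest') p := by
  simp [dfsCost]

theorem dfsCost_pos (mapping : List (String × String)) (rest p : List Char) :
    1 ≤ dfsCost mapping rest p := by
  cases p with
  | nil => simp [dfsCost_nil]
  | cons c q => cases rest with
    | nil => rw [dfsCost_cons_nil]; omega
    | cons y rest' => rw [dfsCost_cons_cons]; omega

-- splitting off one pending char of a frame
theorem frameContrib_cons (mapping : List (String × String)) (pfx : List Char) (u : List String)
    (rest : List Char) (c : Char) (p : List Char) :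
    frameContrib mapping pfx u rest (c :: p)
      = (if PySem.Set.contains u (String.ofList [c]) then []
         else (recPermGo mapping rest (PySem.Set.union u [String.ofList [c]])).map
           (fun t => pfx ++ c :: t))
        ++ frameContrib mapping pfx u rest p := by
  simp [frameContrib]

-- descending one level: A's recursion from a pushed frame's state is that frame's contribution
theorem push_split (mapping : List (String × String)) (pfx : List Char) (u' : List String)
    (y : Char) (rest' : List Char) (c : Char) :
    (recPermGo mapping (y :: rest') u').map (fun t => pfx ++ c :: t)
      = frameContrib mapping (pfx ++ [c]) u' rest'
          (((List.lookup (String.ofList [y]) mapping).getD "").toList) := by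
  simp only [recPermGo, frameContrib, pvMapValA, List.map_flatMap]
  refine List.flatMap_congr ?_
  intro d _
  by_cases hd : String.ofList [d] ∈ u'
  · simp [hd]
  · simp [hd, List.map_map, Function.comp_def]

-- adequacy of the fuel: with at least stackCost fuel, the loop returns exactly what
-- A's recursion still owes the stack
theorem runDFS_adequate (mapping : List (String × String)) :
    ∀ (f : Nat) (st : List (List Char × List String × List Char × List Char)),
      stackCost mapping st ≤ f → runDFS mapping f st = stackContrib mapping st := by
  intro f
  induction f with
  | zero =>
    intro st h
    cases st with
    | nil => simp [runDFS, stackContrib]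
    | cons fr tl =>
      exfalso
      have := dfsCost_pos mapping fr.2.2.1 fr.2.2.2
      simp [stackCost] at h; omega
  | succ f ih =>
    intro st h
    cases st with
    | nil => simp [runDFS, stackContrib]
    | cons fr tl =>
      obtain ⟨pfx, u, rest, pending⟩ := fr
      cases pending with
      | nil =>
        have hc : stackCost mapping tl ≤ f := by
          simp only [stackCost, List.map_cons, List.sum_cons, dfsCost_nil] at h ⊢; omega
        simp [runDFS, ih tl hc, stackContrib, frameContrib]
      | cons c p =>
        by_cases hm : PySem.Set.contains u (String.ofList [c])
        · have hc : stackCost mapping ((pfx, u, rest, p) :: tl) ≤ f := by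
            simp only [stackCost, List.map_cons, List.sum_cons] at h ⊢
            cases rest with
            | nil => rw [dfsCost_cons_nil] at h; omega
            | cons y rest' => rw [dfsCost_cons_cons] at h; omega
          simp only [runDFS, hm, if_true, ih _ hc]
          simp only [stackContrib, List.flatMap_cons, frameContrib_cons, hm, if_true,
            List.nil_append]
        · cases rest with
          | nil =>
            have hc : stackCost mapping ((pfx, u, ([] : List Char), p) :: tl) ≤ f := by
              simp only [stackCost, List.map_cons, List.sum_cons, dfsCost_cons_nil] at h ⊢; omega
            simp only [runDFS, hm, ih _ hc]
            simp only [stackContrib, List.flatMap_cons, frameContrib_cons, hm,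
              recPermGo, List.map_cons, List.map_nil]
            simp
          | cons y rest' =>
            have hc : stackCost mapping
                ((pfx ++ [c], PySem.Set.union u [String.ofList [c]], rest',
                  ((List.lookup (String.ofList [y]) mapping).getD "").toList)
                 :: (pfx, u, y :: rest', p) :: tl) ≤ f := by
              simp only [stackCost, List.map_cons, List.sum_cons] at h ⊢
              rw [dfsCost_cons_cons] at h; omega
            simp only [runDFS, hm, ih _ hc]
            simp only [stackContrib, List.flatMap_cons, frameContrib_cons, hm,
              push_split, List.append_assoc]
            simp

-- A's recursion on a nonempty suffix is the contribution of B's initial frame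
theorem recPermGo_cons_frame (mapping : List (String × String)) (x : Char) (rest : List Char)
    (used : List String) :
    recPermGo mapping (x :: rest) used
      = frameContrib mapping [] used rest
          (((List.lookup (String.ofList [x]) mapping).getD "").toList) := by
  simp [recPermGo, frameContrib, pvMapValA]

-- ===== VERDICT (by name: the statement is the Claim_ definition above) =====
theorem rec_perm_gen_spec : Claim_equal_rec_perm_gen := by
  intro s mapping used _ _
  unfold Spec_rec_perm_gen rec_perm_gen rec_perm_gen_alt
  cases hs : s.toList with
  | nil => simp [recPermGo]
  | cons x rest =>
    have h := runDFS_adequate mapping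
      (dfsCost mapping rest (((List.lookup (String.ofList [x]) mapping).getD "").toList))
      [([], used, rest, (((List.lookup (String.ofList [x]) mapping).getD "").toList))]
      (by simp [stackCost])
    simp only [h, stackContrib, List.flatMap_cons, List.flatMap_nil, List.append_nil]
    rw [recPermGo_cons_frame]
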